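-- pv_equiv track=rewrite | github.com/joopeed/lp1 | 188  Wed, 26 Sep 2012 23:19:18.py | tem123plus
-- ===== SOURCE A (Python) =====
-- def tem123plus(lista):
--         ok = [-1,-1,-1]
--         pos = -1
--         resu = 0
--         for i in range(len(lista)):
--                 if lista[i]==1 and ok[0]==-1:
--                         ok[0] =1
--                         pos = i
--                 if lista[i]==2 and ok[0]!=-1:
--                         ok[1] =1
--                 if lista[i]==3 and ok[1]!=-1:
--                         ok[2] =1
--         for oks in ok:
--                 if oks>0:
--                         resu+=1
--         if resu==3:
--                 return pos
--         else:
--                 return -1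
-- ===== SOURCE B (Python) =====
-- def tem123plus(lista):
--     try:
--         p1 = lista.index(1)
--         p2 = lista.index(2, p1 + 1)
--         lista.index(3, p2 + 1)
--     except ValueError:
--         return -1
--     return p1
-- ===== Notes on version B (the rewrite author's own statement) =====
-- stated objective: simpler
-- what changed: Replaced A's single flag-array loop plus a counting pass with a three-stage search (first 1, then the first 2 after it, then a 3 after that) using list.index with a start offset inside try/except, returning the first 1's index or -1.
import Mathlib
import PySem

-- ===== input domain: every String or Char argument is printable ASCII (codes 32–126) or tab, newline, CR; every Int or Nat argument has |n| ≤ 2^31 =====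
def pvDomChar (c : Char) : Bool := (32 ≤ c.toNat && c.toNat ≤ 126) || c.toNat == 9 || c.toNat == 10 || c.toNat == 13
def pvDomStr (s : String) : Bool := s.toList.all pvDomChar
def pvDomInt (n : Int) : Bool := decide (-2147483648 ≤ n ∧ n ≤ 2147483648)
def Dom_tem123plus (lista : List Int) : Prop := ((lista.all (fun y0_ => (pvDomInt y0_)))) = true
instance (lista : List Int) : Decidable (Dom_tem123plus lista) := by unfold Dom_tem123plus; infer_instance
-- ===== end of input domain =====

-- B replaces A's combined flag loop + counting pass by a three-stage search (first 1, then a 2 after it, then a 3 after that); objective: simpler.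

-- ===== PORT A =====
-- loop body of A's 'for i in range(len(lista))' on state (ok[0], ok[1], ok[2], pos)
def stepA (lista : List Int) (st : Int × Int × Int × Int) (i : Int) : Int × Int × Int × Int :=
  let x := PySem.List.pyGetD lista i 0
  let st1 := if x = 1 ∧ st.1 = -1 then ((1 : Int), st.2.1, st.2.2.1, i) else st
  let st2 := if x = 2 ∧ st1.1 ≠ -1 then (st1.1, (1 : Int), st1.2.2.1, st1.2.2.2) else st1
  if x = 3 ∧ st2.2.1 ≠ -1 then (st2.1, st2.2.1, (1 : Int), st2.2.2.2) else st2

def tem123plus (lista : List Int) : Int :=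
  let s := (PySem.List.pyRange 0 (lista.length : Int) 1).foldl (stepA lista) (-1, -1, -1, -1)
  let resu := [s.1, s.2.1, s.2.2.1].foldl (fun r o => if o > 0 then r + 1 else r) (0 : Int)
  if resu = 3 then s.2.2.2 else -1

-- ===== PORT B =====
-- B: lista.index(1), then lista.index(2, p1+1), then lista.index(3, p2+1); any ValueError -> -1
def tem123plus_alt (lista : List Int) : Int :=
  match PySem.List.index? lista 1 with
  | none => -1
  | some p1 =>
    match PySem.List.index? (lista.drop (p1 + 1)) 2 with
    | none => -1
    | some q =>
      let p2 := p1 + 1 + q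
      match PySem.List.index? (lista.drop (p2 + 1)) 3 with
      | none => -1
      | some _ => (p1 : Int)

-- ===== PRECONDITION & SPEC =====
def Spec_tem123plus (lista : List Int) (out : Int) : Prop := out = tem123plus_alt lista
instance (lista : List Int) (out : Int) : Decidable (Spec_tem123plus lista out) := by unfold Spec_tem123plus; infer_instance

-- ===== CLAIM (what is proved, stated in full; the proofs are below) =====
def Claim_equal_tem123plus : Prop := ∀ (lista : List Int), Dom_tem123plus lista → Spec_tem123plus lista (tem123plus lista)

-- ===== LEMMAS AND PROOFS =====

-- A's loop body seen on an enumerated pair (index, element)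
def stepE (st : Int × Int × Int × Int) (p : Int × Int) : Int × Int × Int × Int :=
  let x := p.2
  let st1 := if x = 1 ∧ st.1 = -1 then ((1 : Int), st.2.1, st.2.2.1, p.1) else st
  let st2 := if x = 2 ∧ st1.1 ≠ -1 then (st1.1, (1 : Int), st1.2.2.1, st1.2.2.2) else st1
  if x = 3 ∧ st2.2.1 ≠ -1 then (st2.1, st2.2.1, (1 : Int), st2.2.2.2) else st2

lemma L3 (xs : List Int) (a p : Int) :
    (PySem.List.enumerate xs a).foldl stepE (1, 1, 1, p) = (1, 1, 1, p) := by
  induction xs generalizing a with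
  | nil => simp [PySem.List.enumerate_nil]
  | cons y ys ih =>
    rw [PySem.List.enumerate_cons, List.foldl_cons]
    have h : stepE (1, 1, 1, p) (a, y) = (1, 1, 1, p) := by
      simp only [stepE]; norm_num
    rw [h, ih]

lemma L2 (xs : List Int) (a p : Int) :
    (PySem.List.enumerate xs a).foldl stepE (1, 1, -1, p)
      = if 3 ∈ xs then (1, 1, 1, p) else (1, 1, -1, p) := by
  induction xs generalizing a with
  | nil => simp [PySem.List.enumerate_nil]
  | cons y ys ih =>
    rw [PySem.List.enumerate_cons, List.foldl_cons]
    by_cases h3 : y = 3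
    · subst h3
      have h : stepE (1, 1, -1, p) (a, (3:Int)) = (1, 1, 1, p) := by
        simp only [stepE]; norm_num
      rw [h, L3]
      simp
    · have h : stepE (1, 1, -1, p) (a, y) = (1, 1, -1, p) := by
        simp only [stepE]; norm_num
        intro h2; exact h3 h2
      rw [h, ih]
      have h3' : (3:Int) ≠ y := fun he => h3 he.symm
      simp [List.mem_cons, h3']

lemma L1 (xs : List Int) (a p : Int) :
    (PySem.List.enumerate xs a).foldl stepE (1, -1, -1, p)
      = match PySem.List.index? xs 2 with
        | none => (1, -1, -1, p)
        | some q => if 3 ∈ xs.drop (q + 1) then (1, 1, 1, p) else (1, 1, -1, p) := by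
  induction xs generalizing a with
  | nil => simp [PySem.List.enumerate_nil, PySem.List.index?]
  | cons y ys ih =>
    rw [PySem.List.enumerate_cons, List.foldl_cons]
    by_cases h2 : y = 2
    · subst h2
      have h : stepE (1, -1, -1, p) (a, (2:Int)) = (1, 1, -1, p) := by
        simp only [stepE]; norm_num
      rw [h, L2, PySem.List.index?_cons_self]
      simp
    · have h : stepE (1, -1, -1, p) (a, y) = (1, -1, -1, p) := by
        simp only [stepE]; norm_num [h2]
      rw [h, ih (a+1), PySem.List.index?_cons_of_ne ys h2]
      cases hq : PySem.List.index? ys 2 with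
      | none => simp
      | some q => simp [List.drop_succ_cons]

lemma L0 (xs : List Int) (a : Int) :
    (PySem.List.enumerate xs a).foldl stepE (-1, -1, -1, -1)
      = match PySem.List.index? xs 1 with
        | none => (-1, -1, -1, -1)
        | some q =>
          match PySem.List.index? (xs.drop (q + 1)) 2 with
          | none => (1, -1, -1, a + q)
          | some q2 =>
            if 3 ∈ (xs.drop (q + 1)).drop (q2 + 1) then (1, 1, 1, a + q)
            else (1, 1, -1, a + q) := by
  induction xs generalizing a with
  | nil => simp [PySem.List.enumerate_nil, PySem.List.index?]
  | cons y ys ih =>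
    rw [PySem.List.enumerate_cons, List.foldl_cons]
    by_cases h1 : y = 1
    · subst h1
      have h : stepE (-1, -1, -1, -1) (a, (1:Int)) = (1, -1, -1, a) := by
        simp only [stepE]; norm_num
      rw [h, L1 ys (a+1) a, PySem.List.index?_cons_self]
      simp only [List.drop_succ_cons, List.drop_zero, Nat.cast_zero, add_zero]
    · have h : stepE (-1, -1, -1, -1) (a, y) = (-1, -1, -1, -1) := by
        simp only [stepE]; norm_num [h1]
      rw [h, ih (a+1), PySem.List.index?_cons_of_ne ys h1]
      cases hq : PySem.List.index? ys 1 with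
      | none => simp
      | some q =>
        have hpa : a + ((q : Int) + 1) = a + 1 + q := by ring
        simp only [Option.map_some, List.drop_succ_cons, Nat.cast_add, Nat.cast_one, hpa]

lemma enum_mem (xs : List Int) (a i x : Int)
    (h : (i, x) ∈ PySem.List.enumerate xs a) :
    a ≤ i ∧ xs.getD (i - a).toNat 0 = x := by
  induction xs generalizing a with
  | nil => simp [PySem.List.enumerate_nil] at h
  | cons y ys ih =>
    rw [PySem.List.enumerate_cons] at h
    rcases List.mem_cons.mp h with h0 | ht
    · obtain ⟨hi, hx⟩ := Prod.mk.inj h0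
      subst hi; subst hx
      refine ⟨le_refl _, ?_⟩
      simp
    · obtain ⟨hle, hget⟩ := ih (a + 1) ht
      refine ⟨by omega, ?_⟩
      have hn : (i - a).toNat = (i - (a + 1)).toNat + 1 := by omega
      rw [hn, List.getD_cons_succ]
      exact hget

lemma stepA_eq (lista : List Int) (st : Int × Int × Int × Int) (p : Int × Int)
    (hx : PySem.List.pyGetD lista p.1 0 = p.2) :
    stepA lista st p.1 = stepE st p := by
  simp only [stepA, stepE, hx]

lemma bridgeA (lista : List Int) (init : Int × Int × Int × Int) :
    (PySem.List.pyRange 0 (lista.length : Int) 1).foldl (stepA lista) init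
      = (PySem.List.enumerate lista 0).foldl stepE init := by
  have h1 : PySem.List.pyRange 0 (lista.length : Int) 1
      = (PySem.List.enumerate lista 0).map (·.1) := by
    rw [PySem.List.map_fst_enumerate]
    norm_num
  rw [h1, List.foldl_map]
  apply PySem.List.foldl_congr_mem
  intro acc p hp
  apply stepA_eq
  obtain ⟨hle, hget⟩ := enum_mem lista 0 p.1 p.2 (by simpa using hp)
  rw [PySem.List.pyGetD_of_nonneg _ _ (by omega)]
  simpa using hget

-- ===== VERDICT (by name: the statement is the Claim_ definition above) =====
theorem tem123plus_spec : Claim_equal_tem123plus := by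
  intro lista _hdom
  unfold Spec_tem123plus
  unfold tem123plus tem123plus_alt
  rw [bridgeA, L0 lista 0]
  simp only [PySem.List.index?_eq_idxOf?]
  cases hq1 : List.idxOf? 1 lista with
  | none => simp only [hq1]; norm_num
  | some p1 =>
    simp only [hq1]
    cases hq2 : List.idxOf? 2 (List.drop (p1 + 1) lista) with
    | none => simp only [hq2]; norm_num
    | some q =>
      simp only [hq2]
      cases hq3 : List.idxOf? 3 (List.drop (p1 + 1 + q + 1) lista) with
      | none =>
        have h3 : 3 ∉ List.drop (p1 + 1 + (q + 1)) lista := by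
          have heq : p1 + 1 + (q + 1) = p1 + 1 + q + 1 := by omega
          rw [heq]
          have := PySem.List.index?_eq_none_iff (List.drop (p1 + 1 + q + 1) lista) (3 : Int)
          rw [PySem.List.index?_eq_idxOf?] at this
          exact this.mp hq3
        simp only [hq3]
        simp [h3]
      | some r =>
        have h3 : 3 ∈ List.drop (p1 + 1 + (q + 1)) lista := by
          have heq : p1 + 1 + (q + 1) = p1 + 1 + q + 1 := by omega
          rw [heq]
          have := PySem.List.index?_isSome_iff (List.drop (p1 + 1 + q + 1) lista) (3 : Int)
          rw [PySem.List.index?_eq_idxOf?] at this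
          exact this.mp (by rw [hq3]; rfl)
        simp only [hq3]
        simp [h3]
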